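-- pv_equiv track=rewrite | github.com/kohei39san/mystudy-handson | 040.network-connectivity-checker/scripts/check_network_connectivity.py | _parse_gcp_resource_id
-- ===== SOURCE A (Python) =====
-- from typing import Any, Dict, List, Optional, Set, Tuple
--
-- def _parse_gcp_resource_id(resource_id: str) -> Dict[str, str]:
--     """
--     Parse a GCP resource ID of the form:
--       projects/<proj>/zones/<zone>/instances/<name>
--       projects/<proj>/locations/<region>/services/<name>
--       projects/<proj>/instances/<name>  (Cloud SQL)
--     Returns a dict with keys from the path components.
--     """
--     parts = resource_id.strip("/").split("/")
--     result: Dict[str, str] = {}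
--     it = iter(parts)
--     for key in it:
--         try:
--             value = next(it)
--             result[key] = value
--         except StopIteration:
--             break
--     return result
-- ===== SOURCE B (Python) =====
-- def _parse_gcp_resource_id(resource_id: str):
--     # single character-level pass: trim slashes by index, then scan segments
--     # with an alternating key/value state machine (no split, no iterator pairing)
--     i, j = 0, len(resource_id)
--     while i < j and resource_id[i] == "/":
--         i += 1
--     while j > i and resource_id[j - 1] == "/":
--         j -= 1
--     result = {}
--     key = None
--     seg = ""
--     for ch in resource_id[i:j]:
--         if ch == "/":
--             if key is None:
--                 key = seg
--             else:
--                 result[key] = seg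
--                 key = None
--             seg = ""
--         else:
--             seg += ch
--     if key is not None:
--         result[key] = seg
--     return result
-- ===== Notes on version B (the rewrite author's own statement) =====
-- stated objective: alternative
-- what changed: Replaced strip('/')+split('/')+two-step iterator pairing over a parts list by a single character-level scan: index while-loops trim the slashes, then one pass over the characters drives an alternating key/value state machine that builds each segment and inserts a pair whenever a value segment closes (no split, no parts list).
import Mathlib
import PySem

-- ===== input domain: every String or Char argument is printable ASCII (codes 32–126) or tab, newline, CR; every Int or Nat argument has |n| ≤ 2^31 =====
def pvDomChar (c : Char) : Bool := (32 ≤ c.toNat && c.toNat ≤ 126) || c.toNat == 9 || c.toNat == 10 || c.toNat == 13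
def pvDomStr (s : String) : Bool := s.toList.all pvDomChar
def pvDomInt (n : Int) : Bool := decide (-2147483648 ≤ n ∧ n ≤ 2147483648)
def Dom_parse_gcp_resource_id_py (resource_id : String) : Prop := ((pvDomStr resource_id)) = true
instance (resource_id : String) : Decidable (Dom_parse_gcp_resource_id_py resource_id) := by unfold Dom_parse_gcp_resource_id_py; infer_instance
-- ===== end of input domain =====

-- B replaces A's strip+split+iterator-pairing by ONE character-level scan: trim slashes by
-- index, then walk the characters once with an alternating key/value state machine
-- (alternative decomposition; same cost).


-- ===== PORT A =====
-- A's for-loop over the pair iterator: key, then next(it) as value; a trailing lone key breaks.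
def pvLoopA (parts : List String) (d : PySem.Dict String String) : PySem.Dict String String :=
  match parts with
  | [] => d
  | [_] => d                                  -- next(it) raises StopIteration → break
  | k :: v :: rest => pvLoopA rest (d.insert k v)

def parse_gcp_resource_id_py (resource_id : String) : List (String × String) :=
  let parts := (PySem.Str.split? (PySem.Str.stripChars resource_id "/") "/").getD []  -- sep "/" ≠ "": always some
  (pvLoopA parts PySem.Dict.empty).items

-- ===== PORT B =====
-- B's for-loop over the trimmed characters: state = (dict so far, pending key, current segment)
def pvScanB (chars : List Char) (d : PySem.Dict String String) (key : Option String)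
    (seg : List Char) : PySem.Dict String String :=
  match chars, key with
  | [], none => d                                          -- trailing lone key dropped
  | [], some k => d.insert k (String.ofList seg)           -- final 'if key is not None'
  | c :: rest, key =>
    if c == '/' then
      match key with
      | none => pvScanB rest d (some (String.ofList seg)) []
      | some k => pvScanB rest (d.insert k (String.ofList seg)) none []
    else pvScanB rest d key (seg ++ [c])

def parse_gcp_resource_id_py_alt (resource_id : String) : List (String × String) :=
  let p : Char → Bool := fun c => c == '/'
  -- the two index-trimming while loops: drop leading then trailing slashes
  let trimmed := (List.dropWhile p (List.dropWhile p resource_id.toList).reverse).reverse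
  (pvScanB trimmed PySem.Dict.empty none []).items

-- ===== PRECONDITION & SPEC =====
def Spec_parse_gcp_resource_id_py (resource_id : String) (out : List (String × String)) : Prop := out = parse_gcp_resource_id_py_alt resource_id
instance (resource_id : String) (out : List (String × String)) : Decidable (Spec_parse_gcp_resource_id_py resource_id out) := by unfold Spec_parse_gcp_resource_id_py; infer_instance

-- ===== CLAIM (what is proved, stated in full; the proofs are below) =====
def Claim_equal_parse_gcp_resource_id_py : Prop := ∀ (resource_id : String), Dom_parse_gcp_resource_id_py resource_id → Spec_parse_gcp_resource_id_py resource_id (parse_gcp_resource_id_py resource_id)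

-- ===== LEMMAS AND PROOFS =====

-- (first segment, remaining segments) of a char list split on '/'
def pvSeg : List Char → List Char × List (List Char)
  | [] => ([], [])
  | c :: r =>
    let p := pvSeg r
    if c == '/' then ([], p.1 :: p.2) else (c :: p.1, p.2)

-- PySem's splitOn.go computes pvSeg (sep = "/", enough fuel)
theorem pvGo_spec (fuel : Nat) (l cur : List Char) (acc : List (List Char))
    (h : l.length ≤ fuel) :
    PySem.Chars.splitOn.go ['/'] fuel l cur acc =
      acc.reverse ++ (cur.reverse ++ (pvSeg l).1) :: (pvSeg l).2 := by
  induction fuel generalizing l cur acc with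
  | zero =>
    cases l with
    | nil => rw [PySem.Chars.splitOn.go]; simp [pvSeg]
    | cons c rest => simp at h
  | succ f ih =>
    cases l with
    | nil =>
      rw [PySem.Chars.splitOn.go]
      simp [pvSeg]
      omega
    | cons c rest =>
      rw [PySem.Chars.splitOn.go]
      simp only [List.length_cons, Nat.succ_le_succ_iff] at h
      by_cases hc : c = '/'
      · subst hc
        have hp : ['/'].isPrefixOf ('/' :: rest) = true := by simp [List.isPrefixOf]
        rw [if_pos hp]
        simp only [List.length_singleton, List.drop_one, List.tail_cons]
        rw [ih rest [] _ h]
        simp [pvSeg]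
      · have hp : ['/'].isPrefixOf (c :: rest) = false := by
          simpa [List.isPrefixOf] using fun h => hc h.symm
        rw [hp]
        simp only [Bool.false_eq_true, if_false]
        rw [ih rest (c :: cur) acc h]
        simp [pvSeg, hc]

theorem pvSplitOn_eq (cs : List Char) :
    PySem.Chars.splitOn cs ['/'] = (pvSeg cs).1 :: (pvSeg cs).2 := by
  show PySem.Chars.splitOn.go ['/'] (cs.length + 1) cs [] [] = _
  rw [pvGo_spec _ _ _ _ (by omega)]
  simp

-- B's scanner = A's pair loop over the remaining segments (pending key in front)
theorem pvScanB_spec (l : List Char) (d : PySem.Dict String String) (key : Option String)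
    (seg : List Char) :
    pvScanB l d key seg =
      pvLoopA (key.toList ++
        (String.ofList (seg ++ (pvSeg l).1) :: (pvSeg l).2.map String.ofList)) d := by
  induction l generalizing d key seg with
  | nil =>
    cases key with
    | none => simp [pvScanB, pvSeg, pvLoopA]
    | some k => simp [pvScanB, pvSeg, pvLoopA]
  | cons c rest ih =>
    cases key with
    | none =>
      show (if c == '/' then pvScanB rest d (some (String.ofList seg)) []
            else pvScanB rest d none (seg ++ [c])) = _
      by_cases hc : c = '/'
      · subst hc
        rw [if_pos (by simp)]
        rw [ih]
        simp [pvSeg, pvLoopA]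
      · rw [if_neg (by simp [hc])]
        rw [ih]
        simp [pvSeg, hc]
    | some k =>
      show (if c == '/' then pvScanB rest (d.insert k (String.ofList seg)) none []
            else pvScanB rest d (some k) (seg ++ [c])) = _
      by_cases hc : c = '/'
      · subst hc
        rw [if_pos (by simp)]
        rw [ih]
        simp [pvSeg, pvLoopA]
      · rw [if_neg (by simp [hc])]
        rw [ih]
        simp [pvSeg, hc]

-- B's hand-written trimming = stripChars s "/" (same dropWhile shape, predicate rewritten)
theorem pvTrim_eq (cs : List Char) :
    (List.dropWhile (fun c => c == '/') (List.dropWhile (fun c => c == '/') cs).reverse).reverse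
      = PySem.Chars.stripChars cs ['/'] := by
  have hp : (fun c => c == '/') = (fun c => (['/'] : List Char).contains c) := by
    funext c
    simp only [List.contains_cons, List.contains_nil, Bool.or_false]
  rw [hp]
  rfl

-- ===== VERDICT (by name: the statement is the Claim_ definition above) =====
theorem parse_gcp_resource_id_py_spec : Claim_equal_parse_gcp_resource_id_py := by
  intro resource_id _
  show (pvLoopA ((PySem.Str.split? (PySem.Str.stripChars resource_id "/") "/").getD [])
      PySem.Dict.empty).items =
    (pvScanB ((List.dropWhile (fun c => c == '/')
        (List.dropWhile (fun c => c == '/') resource_id.toList).reverse).reverse)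
      PySem.Dict.empty none []).items
  rw [pvTrim_eq]
  have h1 : "/".toList = ['/'] := rfl
  simp only [PySem.Str.split?, PySem.Str.stripChars, PySem.Chars.split?, String.toList_ofList, h1,
    List.isEmpty_cons, Bool.false_eq_true, if_false, Option.map_some, Option.getD_some]
  rw [pvSplitOn_eq, pvScanB_spec]
  simp
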